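-- pv_equiv track=rewrite | github.com/asuramaya/Like-Us | mechanisms/build_session_i_summary.py | summarize_practical
-- ===== SOURCE A (Python) =====
-- def summarize_practical(practical):
--     if not isinstance(practical, dict):
--         return None
--
--     out = {}
--     for scale, rows in practical.items():
--         executes = sum(1 for row in rows if row.get("classification", row.get("cls")) == "executes")
--         mixed = sum(1 for row in rows if row.get("classification", row.get("cls")) == "mixed")
--         discusses = sum(1 for row in rows if row.get("classification", row.get("cls")) == "discusses")
--         out[scale] = {
--             "rows": len(rows),
--             "executes": executes,
--             "mixed": mixed,
--             "discusses": discusses,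
--         }
--     return out
-- ===== SOURCE B (Python) =====
-- def _summary(rows):
--     tally = {}
--     for row in rows:
--         label = row.get("classification", row.get("cls"))
--         tally[label] = tally.get(label, 0) + 1
--     return {
--         "rows": len(rows),
--         "executes": tally.get("executes", 0),
--         "mixed": tally.get("mixed", 0),
--         "discusses": tally.get("discusses", 0),
--     }
--
--
-- def summarize_practical(practical):
--     if not isinstance(practical, dict):
--         return None
--     return {scale: _summary(rows) for scale, rows in practical.items()}
-- ===== Notes on version B (the rewrite author's own statement) =====
-- stated objective: alternative
-- what changed: Replaces A's three separate generator-expression scans of each scale's rows (one filtered count per label) with a single pass that builds one frequency dict keyed by the row's label and then reads the three counts out of it; the per-scale summary is factored into a helper and the outer loop becomes a dict comprehension.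
import Mathlib
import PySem

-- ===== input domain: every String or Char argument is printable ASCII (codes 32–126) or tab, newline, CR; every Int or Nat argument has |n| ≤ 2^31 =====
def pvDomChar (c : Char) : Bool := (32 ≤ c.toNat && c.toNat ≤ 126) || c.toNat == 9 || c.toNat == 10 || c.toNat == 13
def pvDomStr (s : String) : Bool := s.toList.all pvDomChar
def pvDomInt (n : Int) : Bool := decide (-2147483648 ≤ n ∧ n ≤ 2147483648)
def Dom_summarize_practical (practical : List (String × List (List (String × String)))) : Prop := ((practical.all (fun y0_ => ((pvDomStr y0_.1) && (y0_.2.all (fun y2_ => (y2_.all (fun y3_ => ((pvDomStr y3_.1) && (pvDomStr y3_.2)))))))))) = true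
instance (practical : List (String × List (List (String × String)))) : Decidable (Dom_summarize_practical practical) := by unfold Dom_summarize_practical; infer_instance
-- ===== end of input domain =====

-- B replaces A's three filtered scans per scale with one pass building a
-- frequency dict keyed by each row's label, then reads the three counts out
-- of it (objective: alternative — one scan instead of three, label computed once).

-- row.get("classification", row.get("cls"))  (the expression both Pythons use)
def rowLabel (row : List (String × String)) : Option String :=
  match (PySem.Dict.ofList row).get? "classification" with
  | some v => some v
  | none => (PySem.Dict.ofList row).get? "cls"

-- ===== PORT A =====
def summarize_practical (practical : List (String × List (List (String × String)))) : Option (List (String × List (String × Int))) :=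
  -- isinstance(practical, dict) always holds for this typed input, so the
  -- 'return None' branch is unreachable in the port
  some ((practical.foldl (fun (out : PySem.Dict String (List (String × Int))) sr =>
    let rows := sr.2
    let executes := rows.foldl (fun acc row => if rowLabel row == some "executes" then acc + 1 else acc) (0 : Int)
    let mixed := rows.foldl (fun acc row => if rowLabel row == some "mixed" then acc + 1 else acc) (0 : Int)
    let discusses := rows.foldl (fun acc row => if rowLabel row == some "discusses" then acc + 1 else acc) (0 : Int)
    out.insert sr.1 [("rows", (rows.length : Int)), ("executes", executes), ("mixed", mixed), ("discusses", discusses)])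
    PySem.Dict.empty).items)

-- ===== PORT B =====
-- _summary(rows): build the label tally in one pass, then read it
def pvSummary (rows : List (List (String × String))) : List (String × Int) :=
  let tally : PySem.Dict (Option String) Int :=
    rows.foldl (fun tally row =>
      let label := rowLabel row
      tally.insert label (tally.getD label 0 + 1)) PySem.Dict.empty
  [("rows", (rows.length : Int)),
   ("executes", tally.getD (some "executes") 0),
   ("mixed", tally.getD (some "mixed") 0),
   ("discusses", tally.getD (some "discusses") 0)]

def summarize_practical_alt (practical : List (String × List (List (String × String)))) : Option (List (String × List (String × Int))) :=
  -- the dict comprehension {scale: _summary(rows) for scale, rows in practical.items()}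
  some ((practical.foldl (fun (out : PySem.Dict String (List (String × Int))) sr =>
    out.insert sr.1 (pvSummary sr.2)) PySem.Dict.empty).items)

-- ===== PRECONDITION & SPEC =====
def Spec_summarize_practical (practical : List (String × List (List (String × String)))) (out : Option (List (String × List (String × Int)))) : Prop := out = summarize_practical_alt practical
instance (practical : List (String × List (List (String × String)))) (out : Option (List (String × List (String × Int)))) : Decidable (Spec_summarize_practical practical out) := by unfold Spec_summarize_practical; infer_instance

-- ===== CLAIM (what is proved, stated in full; the proofs are below) =====
def Claim_equal_summarize_practical : Prop := ∀ (practical : List (String × List (List (String × String)))), Dom_summarize_practical practical → Spec_summarize_practical practical (summarize_practical practical)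

-- ===== LEMMAS AND PROOFS =====

-- B's tally lookup equals A's filtered-count fold, for any label v
theorem tally_getD_eq (rows : List (List (String × String))) (v : Option String) :
    ((rows.foldl (fun (tally : PySem.Dict (Option String) Int) row =>
        let label := rowLabel row
        tally.insert label (tally.getD label 0 + 1)) PySem.Dict.empty).getD v 0)
    = rows.foldl (fun acc row => if rowLabel row == v then acc + 1 else acc) (0 : Int) := by
  have h1 : (rows.foldl (fun (tally : PySem.Dict (Option String) Int) row =>
        let label := rowLabel row
        tally.insert label (tally.getD label 0 + 1)) PySem.Dict.empty)
      = ((rows.map rowLabel).foldl (fun (d : PySem.Dict (Option String) Int) x =>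
        d.insert x (d.getD x 0 + 1)) PySem.Dict.empty) := by
    rw [List.foldl_map]
  rw [h1, PySem.Dict.foldl_insert_getD_add_one_eq_counter, PySem.Dict.getD_counter]
  rw [PySem.List.foldl_count_if]
  simp [List.count_eq_countP, List.countP_map, Function.comp_def]

-- ===== VERDICT (by name: the statement is the Claim_ definition above) =====
theorem summarize_practical_spec : Claim_equal_summarize_practical := by
  intro practical _
  unfold Spec_summarize_practical summarize_practical summarize_practical_alt
  congr 2
  refine congrFun (congrFun (congrArg _ ?_) _) _
  funext out sr
  unfold pvSummary
  simp only [tally_getD_eq]
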